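-- pv_equiv track=rewrite | github.com/GloriousLotus/advent_calendar | 2025/day_2/func.py | is_invalid_id_n
-- ===== SOURCE A (Python) =====
-- def is_invalid_id_n(x:str,n:int)->bool:
--     if n<=1 or n>len(x) or len(x)%n !=0:
--         return False
--     else:
--         q = len(x)//n
--         for _ in range(n-1):
--             if x[q*_:q*_+q] != x[q*_+q:q*_+2*q]:
--                 return False
--         return True
-- ===== SOURCE B (Python) =====
-- def is_invalid_id_n(x: str, n: int) -> bool:
--     if n <= 1 or n > len(x) or len(x) % n != 0:
--         return False
--     q = len(x) // n
--     return x == x[:q] * n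
-- ===== Notes on version B (the rewrite author's own statement) =====
-- stated objective: simpler
-- what changed: Replaced the index-arithmetic loop comparing each adjacent pair of blocks with a closed-form check: build the expected string (first block repeated n times) once and compare it to x.
import Mathlib
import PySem

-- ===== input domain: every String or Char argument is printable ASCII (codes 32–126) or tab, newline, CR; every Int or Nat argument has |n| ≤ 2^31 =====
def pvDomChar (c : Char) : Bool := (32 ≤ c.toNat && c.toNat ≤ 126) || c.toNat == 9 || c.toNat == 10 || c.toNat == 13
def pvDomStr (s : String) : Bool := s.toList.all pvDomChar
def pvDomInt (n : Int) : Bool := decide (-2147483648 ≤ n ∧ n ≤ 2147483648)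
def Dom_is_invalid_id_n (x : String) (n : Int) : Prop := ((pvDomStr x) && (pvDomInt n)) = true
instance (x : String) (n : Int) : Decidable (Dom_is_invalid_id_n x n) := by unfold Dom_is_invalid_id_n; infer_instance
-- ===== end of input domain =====

-- B replaces A's pairwise adjacent-block comparison loop with a single closed-form
-- comparison x == x[:q]*n (same cost, simpler); return values agree everywhere.

-- ===== PORT A =====
-- the for-loop of A: fuel = remaining iterations, i = current loop index `_`
def pvLoopA (l : List Char) (q : Int) : Nat → Int → Bool
  | 0, _ => true
  | fuel+1, i =>
    if PySem.List.slice l (some (q*i)) (some (q*i+q)) ≠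
       PySem.List.slice l (some (q*i+q)) (some (q*i+2*q)) then false
    else pvLoopA l q fuel (i+1)

def is_invalid_id_n (x : String) (n : Int) : Bool :=
  let l := x.toList
  let len : Int := l.length
  if n ≤ 1 ∨ n > len ∨ PySem.Int.mod len n ≠ 0 then false
  else
    let q := PySem.Int.floordiv len n
    pvLoopA l q (n - 1).toNat 0

-- ===== PORT B =====
def is_invalid_id_n_alt (x : String) (n : Int) : Bool :=
  let l := x.toList
  let len : Int := l.length
  if n ≤ 1 ∨ n > len ∨ PySem.Int.mod len n ≠ 0 then false
  else
    let q := PySem.Int.floordiv len n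
    l == (List.replicate n.toNat (PySem.List.slice l none (some q))).flatten

-- ===== PRECONDITION & SPEC =====
def Spec_is_invalid_id_n (x : String) (n : Int) (out : Bool) : Prop := out = is_invalid_id_n_alt x n
instance (x : String) (n : Int) (out : Bool) : Decidable (Spec_is_invalid_id_n x n out) := by unfold Spec_is_invalid_id_n; infer_instance

-- ===== CLAIM (what is proved, stated in full; the proofs are below) =====
def Claim_equal_is_invalid_id_n : Prop := ∀ (x : String) (n : Int), Dom_is_invalid_id_n x n → Spec_is_invalid_id_n x n (is_invalid_id_n x n)

-- ===== LEMMAS AND PROOFS =====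

-- block k of l, in Nat arithmetic
def pvBlk (l : List Char) (Q k : Nat) : List Char := (l.drop (Q*k)).take Q

theorem pvLoopA_eq (l : List Char) (Q : Nat) :
    ∀ (fuel i : Nat), pvLoopA l (Q:Int) fuel (i:Int)
      = decide (∀ j, j < fuel → pvBlk l Q (i+j) = pvBlk l Q (i+j+1)) := by
  intro fuel
  induction fuel with
  | zero => intro i; simp [pvLoopA]
  | succ f ih =>
    intro i
    have h1 : PySem.List.slice l (some ((Q:Int)*(i:Int))) (some ((Q:Int)*(i:Int)+(Q:Int)))
        = pvBlk l Q i := by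
      have := PySem.List.slice_natCast_add l (Q*i) Q
      simpa [pvBlk] using this
    have h2 : PySem.List.slice l (some ((Q:Int)*(i:Int)+(Q:Int))) (some ((Q:Int)*(i:Int)+2*(Q:Int)))
        = pvBlk l Q (i+1) := by
      have h := PySem.List.slice_natCast_add l (Q*i+Q) Q
      have e : ((Q*i+Q : Nat) : Int) = (Q:Int)*(i:Int)+(Q:Int) := by push_cast; ring
      rw [e] at h
      have e2 : (Q:Int)*(i:Int)+(Q:Int)+(Q:Int) = (Q:Int)*(i:Int)+2*(Q:Int) := by ring
      rw [e2] at h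
      rw [h]
      simp [pvBlk, Nat.mul_add]
    by_cases hb : pvBlk l Q i = pvBlk l Q (i+1)
    · have hstep : pvLoopA l (Q:Int) (f+1) (i:Int) = pvLoopA l (Q:Int) f ((i:Int)+1) := by
        simp [pvLoopA, h1, h2, hb]
      rw [hstep]
      have e : ((i:Int)+1) = ((i+1 : Nat) : Int) := by push_cast; ring
      rw [e, ih (i+1)]
      apply decide_eq_decide.mpr
      constructor
      · -- shifted chain (plus hb) gives the chain at i
        intro h j hj
        rcases Nat.eq_zero_or_pos j with rfl | hp
        · simpa using hb
        · obtain ⟨k, rfl⟩ : ∃ k, j = k + 1 := ⟨j - 1, by omega⟩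
          have hk := h k (by omega)
          have e1 : i + (k+1) = i + 1 + k := by omega
          rw [e1]; exact hk
      · -- the chain at i restricted to the tail
        intro h j hj
        have hk := h (j+1) (by omega)
        have e1 : i + (j+1) = i + 1 + j := by omega
        rw [e1] at hk; exact hk
    · have hstep : pvLoopA l (Q:Int) (f+1) (i:Int) = false := by
        simp [pvLoopA, h1, h2, hb]
      rw [hstep]
      symm
      rw [decide_eq_false_iff_not]
      intro h
      exact hb (by simpa using h 0 (by omega))

-- every block of a flattened replicate is the repeated block
theorem pvBlk_flatten (Q : Nat) (b : List Char) (hb : b.length = Q) :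
    ∀ (N i : Nat), i < N → pvBlk ((List.replicate N b).flatten) Q i = b := by
  intro N
  induction N with
  | zero => intro i hi; omega
  | succ m ih =>
    intro i hi
    rcases Nat.eq_zero_or_pos i with rfl | hp
    · have : pvBlk ((List.replicate (m+1) b).flatten) Q 0
          = (b ++ (List.replicate m b).flatten).take b.length := by
        simp [pvBlk, List.replicate_succ, hb]
      rw [this, List.take_left]
    · obtain ⟨k, rfl⟩ : ∃ k, i = k + 1 := ⟨i - 1, by omega⟩
      have e : Q*(k+1) = b.length + Q*k := by rw [hb]; ring
      have hdrop : ((List.replicate (m+1) b).flatten).drop (Q*(k+1))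
          = ((List.replicate m b).flatten).drop (Q*k) := by
        rw [List.replicate_succ, List.flatten_cons, e]
        simp [List.drop_append]
      have : pvBlk ((List.replicate (m+1) b).flatten) Q (k+1)
          = pvBlk ((List.replicate m b).flatten) Q k := by
        simp only [pvBlk, hdrop]
      rw [this]
      exact ih k (by omega)

-- a chain of adjacent equal blocks gives the replicate form
theorem pvChain_to_rep (Q : Nat) :
    ∀ (N : Nat) (l : List Char), l.length = Q*N →
      (∀ j, j < N - 1 → pvBlk l Q j = pvBlk l Q (j+1)) →
      l = (List.replicate N (l.take Q)).flatten := by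
  intro N
  induction N with
  | zero =>
    intro l hl _
    have hnil : l = [] := List.length_eq_zero_iff.mp (by simpa using hl)
    subst hnil
    simp
  | succ m ih =>
    intro l hl hchain
    rcases Nat.eq_zero_or_pos m with rfl | hm
    · -- one block: l itself
      have hlq : l.length = Q := by simpa using hl
      simp [List.replicate_succ, List.take_of_length_le hlq.le]
    · have hl₂ : (l.drop Q).length = Q*m := by
        rw [List.length_drop, hl, Nat.mul_succ]
        omega
      have hblk : ∀ j, pvBlk (l.drop Q) Q j = pvBlk l Q (j+1) := by
        intro j
        simp [pvBlk, List.drop_drop, Nat.mul_add, Nat.add_comm]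
      have hchain₂ : ∀ j, j < m - 1 → pvBlk (l.drop Q) Q j = pvBlk (l.drop Q) Q (j+1) := by
        intro j hj
        rw [hblk, hblk]
        exact hchain (j+1) (by omega)
      have hrec := ih (l.drop Q) hl₂ hchain₂
      have htake : (l.drop Q).take Q = l.take Q := by
        have h0 := hchain 0 (by omega)
        have e1 : pvBlk l Q 0 = l.take Q := by simp [pvBlk]
        have e2 : pvBlk l Q 1 = (l.drop Q).take Q := by simp [pvBlk]
        rw [e1, e2] at h0
        exact h0.symm
      rw [htake] at hrec
      calc l = l.take Q ++ l.drop Q := (List.take_append_drop Q l).symm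
        _ = l.take Q ++ (List.replicate m (l.take Q)).flatten := by rw [← hrec]
        _ = (List.replicate (m+1) (l.take Q)).flatten := by
            rw [List.replicate_succ, List.flatten_cons]

-- ===== VERDICT (by name: the statement is the Claim_ definition above) =====
theorem is_invalid_id_n_spec : Claim_equal_is_invalid_id_n := by
  intro x n _
  unfold Spec_is_invalid_id_n is_invalid_id_n is_invalid_id_n_alt
  simp only []
  set l := x.toList with hl
  set len : Int := (l.length : Int) with hlen
  by_cases hc : n ≤ 1 ∨ n > len ∨ PySem.Int.mod len n ≠ 0
  · simp [hc]
  · simp only [hc, if_false]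
    push Not at hc
    obtain ⟨h1, h2, h3⟩ := hc
    have hnpos : 0 < n := by omega
    have hq : PySem.Int.floordiv len n = len / n := PySem.Int.floordiv_eq_ediv_of_pos hnpos
    have hm : PySem.Int.mod len n = len % n := PySem.Int.mod_eq_emod_of_pos hnpos
    rw [hm] at h3
    have hlen0 : 0 ≤ len := by simp [hlen]
    have hqnn : 0 ≤ len / n := Int.ediv_nonneg hlen0 hnpos.le
    have hdm : n * (len / n) + len % n = len := Int.mul_ediv_add_emod len n
    rw [h3, add_zero] at hdm
    -- name the Nat versions
    have hnN : n = ((n.toNat : Nat) : Int) := (Int.toNat_of_nonneg hnpos.le).symm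
    have hqQ : len / n = (((len / n).toNat : Nat) : Int) := (Int.toNat_of_nonneg hqnn).symm
    set N := n.toNat with hN
    set Q := (len / n).toNat with hQ
    have hlenQ : l.length = Q * N := by
      have : len = ((Q * N : Nat) : Int) := by
        rw [← hdm, hqQ, hnN]; push_cast; ring
      rw [hlen] at this
      exact_mod_cast this
    have hn1 : (n - 1).toNat = N - 1 := by omega
    have hslice : PySem.List.slice l none (some ((Q:Int))) = l.take Q := by
      rw [PySem.List.slice_to _ (by exact_mod_cast Nat.zero_le Q)]
      simp
    rw [hq, hqQ, hn1, hslice]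
    have h0 : ((0:Int)) = ((0:Nat):Int) := rfl
    rw [h0, pvLoopA_eq l Q (N-1) 0]
    have hbeq : ∀ (u v : List Char), (u == v) = decide (u = v) := by
      intro u v; by_cases h : u = v <;> simp [h]
    rw [hbeq l ((List.replicate N (l.take Q)).flatten)]
    apply decide_eq_decide.mpr
    have hN2 : 2 ≤ N := by omega
    constructor
    · intro h
      exact pvChain_to_rep Q N l hlenQ (by simpa using h)
    · intro h j hj
      have hbl : (l.take Q).length = Q := by
        rw [List.length_take, hlenQ]
        have : Q ≤ Q * N := Nat.le_mul_of_pos_right Q (by omega)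
        omega
      obtain ⟨b, hbdef⟩ : ∃ b, b = l.take Q := ⟨_, rfl⟩
      rw [← hbdef] at h hbl
      have hf := pvBlk_flatten Q b hbl N
      simp only [Nat.zero_add]
      rw [h, hf j (by omega), hf (j+1) (by omega)]
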